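-- pv_equiv track=rewrite | github.com/songbowang125/Swave | src/pack_sv/op_vcf.py | hap_gt_to_sample_gt
-- ===== SOURCE A (Python) =====
-- def hap_gt_to_sample_gt(sample_gt, mode="raw"):
--
--     if mode == "split":
--         gt_flags = []
--         for hap_gt in sample_gt:
--             gt_flags.append(hap_gt)
--
--         return "{}".format("|".join(gt_flags))
--
--     else:
--         gt_flags = []
--         sv_types = []
--         sv_lengths = []
--         # sv_quals = []
--         sv_bkps = []
--
--         for hap_gt in sample_gt:
--             hap_gt_split = hap_gt.split(":")
--
--             gt_flags.append(hap_gt_split[0])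
--             sv_types.append(hap_gt_split[1])
--             sv_lengths.append(hap_gt_split[2])
--             # sv_quals.append(hap_gt_split[3])
--             sv_bkps.append(hap_gt_split[3])
--
--         return "{}:{}:{}:{}".format("|".join(gt_flags), "|".join(sv_types), "|".join(sv_lengths), "|".join(sv_bkps))
-- ===== SOURCE B (Python) =====
-- def hap_gt_to_sample_gt(sample_gt, mode="raw"):
--     if mode == "split":
--         return "|".join(sample_gt)
--     # single pass: grow the four column strings directly, no lists, no final "|".join
--     cols = None
--     for hap_gt in sample_gt:
--         p = hap_gt.split(":")
--         if cols is None: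
--             cols = (p[0], p[1], p[2], p[3])
--         else:
--             cols = (cols[0] + "|" + p[0], cols[1] + "|" + p[1],
--                     cols[2] + "|" + p[2], cols[3] + "|" + p[3])
--     if cols is None:
--         return ":::"
--     return ":".join(cols)
-- ===== Notes on version B (the rewrite author's own statement) =====
-- stated objective: alternative
-- what changed: A collects four parallel lists in a loop and then runs four '|'.join passes plus a format; B makes a single pass that carries one 4-tuple of column strings and extends each with '|'+field as it goes, so no intermediate lists and no '|'.join pass exist, and the empty case returns ':::' directly.
import Mathlib
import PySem

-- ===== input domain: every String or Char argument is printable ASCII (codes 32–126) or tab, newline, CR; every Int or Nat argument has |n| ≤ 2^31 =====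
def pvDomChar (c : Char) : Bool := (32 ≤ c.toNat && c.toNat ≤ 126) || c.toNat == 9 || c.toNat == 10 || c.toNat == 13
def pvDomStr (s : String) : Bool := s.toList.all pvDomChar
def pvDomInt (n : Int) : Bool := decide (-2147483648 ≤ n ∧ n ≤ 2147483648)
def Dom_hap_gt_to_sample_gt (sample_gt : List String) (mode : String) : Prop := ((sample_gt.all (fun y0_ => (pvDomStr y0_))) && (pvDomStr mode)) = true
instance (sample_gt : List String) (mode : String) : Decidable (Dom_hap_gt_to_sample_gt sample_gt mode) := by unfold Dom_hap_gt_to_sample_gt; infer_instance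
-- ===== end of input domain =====

-- B replaces A's four collected lists + four '|'.join passes by a single pass carrying one 4-tuple of column strings grown in place; same task, alternative decomposition.


-- shared primitive shim: Python's s.split(":"); exact because the separator ":" is nonempty, so split? returns some
def pySplitColon (s : String) : List String := (PySem.Str.split? s ":").getD []

-- ===== PORT A =====
-- A's hap_gt_split[k] raises IndexError on short rows; the port reads it with pyGetD "" — those inputs are excluded by Pre_ below
def hap_gt_to_sample_gt (sample_gt : List String) (mode : String) : String :=
  if mode = "split" then
    let gt_flags := sample_gt.foldl (fun acc hap_gt => acc ++ [hap_gt]) ([] : List String)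
    PySem.Str.join "|" gt_flags
  else
    let st := sample_gt.foldl
      (fun (s : List String × List String × List String × List String) hap_gt =>
        let sp := pySplitColon hap_gt
        (s.1 ++ [PySem.List.pyGetD sp 0 ""],
         s.2.1 ++ [PySem.List.pyGetD sp 1 ""],
         s.2.2.1 ++ [PySem.List.pyGetD sp 2 ""],
         s.2.2.2 ++ [PySem.List.pyGetD sp 3 ""]))
      (([], [], [], []) : List String × List String × List String × List String)
    PySem.Str.join "|" st.1 ++ ":" ++ PySem.Str.join "|" st.2.1 ++ ":" ++
      PySem.Str.join "|" st.2.2.1 ++ ":" ++ PySem.Str.join "|" st.2.2.2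

-- ===== PORT B =====
-- B's loop body: p = hap_gt.split(":"); first entry seeds the 4-tuple, later entries extend each column with "|" + field.
-- B's p[i] raises IndexError on short rows; the port reads it with pyGetD "" — those inputs are excluded by Pre_ below
def pvStepB (acc : Option (String × String × String × String)) (hap_gt : String) :
    Option (String × String × String × String) :=
  let sp := pySplitColon hap_gt
  let p0 := PySem.List.pyGetD sp 0 ""
  let p1 := PySem.List.pyGetD sp 1 ""
  let p2 := PySem.List.pyGetD sp 2 ""
  let p3 := PySem.List.pyGetD sp 3 ""
  match acc with
  | none => some (p0, p1, p2, p3)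
  | some c => some (c.1 ++ "|" ++ p0, c.2.1 ++ "|" ++ p1, c.2.2.1 ++ "|" ++ p2, c.2.2.2 ++ "|" ++ p3)

def hap_gt_to_sample_gt_alt (sample_gt : List String) (mode : String) : String :=
  if mode = "split" then
    PySem.Str.join "|" sample_gt
  else
    match sample_gt.foldl pvStepB none with
    | none => ":::"
    | some c => PySem.Str.join ":" [c.1, c.2.1, c.2.2.1, c.2.2.2]

-- ===== PRECONDITION & SPEC =====
-- Pre_ excludes (for mode ≠ "split") entries with fewer than three ':' separators: there both Pythons raise IndexError.
def Pre_hap_gt_to_sample_gt (sample_gt : List String) (mode : String) : Prop :=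
  mode = "split" ∨ ∀ h ∈ sample_gt, 3 ≤ PySem.Str.count h ":"
instance (sample_gt : List String) (mode : String) : Decidable (Pre_hap_gt_to_sample_gt sample_gt mode) := by unfold Pre_hap_gt_to_sample_gt; infer_instance
def pvWitness_hap_gt_to_sample_gt : List String × String := (["0/1:DEL:50:12", "1/1:INS:7:3"], "raw")

def Spec_hap_gt_to_sample_gt (sample_gt : List String) (mode : String) (out : String) : Prop := out = hap_gt_to_sample_gt_alt sample_gt mode
instance (sample_gt : List String) (mode : String) (out : String) : Decidable (Spec_hap_gt_to_sample_gt sample_gt mode out) := by unfold Spec_hap_gt_to_sample_gt; infer_instance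

-- ===== CLAIM (what is proved, stated in full; the proofs are below) =====
def Claim_equal_hap_gt_to_sample_gt : Prop := ∀ (sample_gt : List String) (mode : String), Dom_hap_gt_to_sample_gt sample_gt mode → Pre_hap_gt_to_sample_gt sample_gt mode → Spec_hap_gt_to_sample_gt sample_gt mode (hap_gt_to_sample_gt sample_gt mode)

-- ===== LEMMAS AND PROOFS =====

-- the four field readers
def pvF (i : Nat) (h : String) : String := PySem.List.pyGetD (pySplitColon h) i ""

-- A's quadruple fold builds the four column maps
theorem fold4_eq (l : List String) (a b c d : List String) :
    l.foldl
      (fun (s : List String × List String × List String × List String) hap_gt =>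
        let sp := pySplitColon hap_gt
        (s.1 ++ [PySem.List.pyGetD sp 0 ""],
         s.2.1 ++ [PySem.List.pyGetD sp 1 ""],
         s.2.2.1 ++ [PySem.List.pyGetD sp 2 ""],
         s.2.2.2 ++ [PySem.List.pyGetD sp 3 ""])) (a, b, c, d)
    = (a ++ l.map (pvF 0), b ++ l.map (pvF 1), c ++ l.map (pvF 2), d ++ l.map (pvF 3)) := by
  induction l generalizing a b c d with
  | nil => simp
  | cons x xs ih => simp [List.foldl_cons, ih, pvF]

-- B's fold, once seeded, grows each component by "|" ++ field
theorem foldB_some (l : List String) (a b c d : String) :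
    l.foldl pvStepB (some (a, b, c, d))
    = some (l.foldl (fun s x => s ++ "|" ++ pvF 0 x) a,
            l.foldl (fun s x => s ++ "|" ++ pvF 1 x) b,
            l.foldl (fun s x => s ++ "|" ++ pvF 2 x) c,
            l.foldl (fun s x => s ++ "|" ++ pvF 3 x) d) := by
  induction l generalizing a b c d with
  | nil => rfl
  | cons x xs ih => simp [List.foldl_cons, pvStepB, ih, pvF]

-- Chars.join absorbs a prefix of its head element
theorem join_head_append (sep a b : List Char) (l : List (List Char)) :
    PySem.Chars.join sep ((a ++ b) :: l) = a ++ PySem.Chars.join sep (b :: l) := by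
  cases l with
  | nil => simp [PySem.Chars.join_singleton]
  | cons c cs => simp [PySem.Chars.join_cons_cons, List.append_assoc]

-- "|".join over a nonempty mapped list is B's incremental string fold
theorem join_eq_foldl (f : String → String) (xs : List String) (x : String) :
    PySem.Str.join "|" (x :: xs.map f) = xs.foldl (fun s y => s ++ "|" ++ f y) x := by
  induction xs generalizing x with
  | nil =>
    rw [← String.toList_inj]
    simp [PySem.Str.toList_join, PySem.Chars.join_singleton]
  | cons y ys ih =>
    rw [List.map_cons, List.foldl_cons, ← ih (x ++ "|" ++ f y), ← String.toList_inj]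
    simp only [PySem.Str.toList_join, List.map_cons, String.toList_append]
    rw [show (x.toList ++ "|".toList ++ (f y).toList) = (x.toList ++ "|".toList) ++ (f y).toList from by simp [List.append_assoc]]
    rw [join_head_append, PySem.Chars.join_cons_cons, List.append_assoc]

-- ":".join of an explicit 4-list, spelled out
theorem join_colon4 (a b c d : String) :
    PySem.Str.join ":" [a, b, c, d] = a ++ ":" ++ b ++ ":" ++ c ++ ":" ++ d := by
  rw [← String.toList_inj]
  simp [PySem.Str.toList_join, PySem.Chars.join_cons_cons, PySem.Chars.join_singleton,
    List.append_assoc]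

theorem hap_gt_spec_aux (sample_gt : List String) (mode : String) :
    hap_gt_to_sample_gt sample_gt mode = hap_gt_to_sample_gt_alt sample_gt mode := by
  unfold hap_gt_to_sample_gt hap_gt_to_sample_gt_alt
  by_cases hm : mode = "split"
  · simp [hm, PySem.List.foldl_append_singleton_eq_map (fun x : String => x)]
  · simp only [hm, if_false, fold4_eq, List.nil_append]
    cases sample_gt with
    | nil => decide
    | cons x xs =>
      have hseed : (x :: xs).foldl pvStepB none = xs.foldl pvStepB (some (pvF 0 x, pvF 1 x, pvF 2 x, pvF 3 x)) := by
        simp [List.foldl_cons, pvStepB, pvF]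
      rw [hseed, foldB_some]
      simp only [List.map_cons]
      rw [join_eq_foldl (pvF 0), join_eq_foldl (pvF 1), join_eq_foldl (pvF 2), join_eq_foldl (pvF 3),
        join_colon4]

-- ===== VERDICT (by name: the statement is the Claim_ definition above) =====
theorem hap_gt_to_sample_gt_spec : Claim_equal_hap_gt_to_sample_gt := by
  intro sample_gt mode _ _
  exact hap_gt_spec_aux sample_gt mode
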